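-- pv_equiv track=rewrite | github.com/Strunnick/tokenizer | g_analiser.py | isInSet
-- ===== SOURCE A (Python) =====
-- def isInSet(st,arr):
--     res = True
--     ln = len
--     ind = 0
--     for ind in range(ln(st)):
--         if st[ind] in arr: res = True
--         else:
--             res = False
--             break
--     return res
-- ===== SOURCE B (Python) =====
-- def isInSet(st, arr):
--     def merge_sub(a, b):
--         # a, b strictly increasing; True iff every element of a occurs in b
--         if not a:
--             return True
--         if not b:
--             return False
--         if b[0] < a[0]:
--             return merge_sub(a, b[1:])
--         if b[0] == a[0]:
--             return merge_sub(a[1:], b)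
--         return False
--     return merge_sub(sorted(set(st)), sorted(set(arr)))
-- ===== Notes on version B (the rewrite author's own statement) =====
-- stated objective: alternative
-- what changed: Replace the linear scan with per-character membership tests by a sort-then-merge subset check: sort the distinct characters of both strings and walk the two sorted lists with a two-pointer merge, so no membership test or early-break loop over arr remains.
import Mathlib
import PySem

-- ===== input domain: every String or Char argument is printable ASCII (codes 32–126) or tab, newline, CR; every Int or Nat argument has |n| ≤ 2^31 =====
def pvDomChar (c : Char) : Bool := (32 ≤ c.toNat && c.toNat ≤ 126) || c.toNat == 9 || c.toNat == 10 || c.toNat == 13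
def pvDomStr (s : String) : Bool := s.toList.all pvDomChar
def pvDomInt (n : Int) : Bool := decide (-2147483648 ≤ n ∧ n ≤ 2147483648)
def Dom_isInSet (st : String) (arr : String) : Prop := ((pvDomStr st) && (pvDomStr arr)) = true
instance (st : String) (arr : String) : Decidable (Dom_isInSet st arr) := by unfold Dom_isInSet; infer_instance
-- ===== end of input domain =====

-- B replaces A's membership-test scan by a sort-then-merge subset check over the sorted distinct characters (alternative algorithm; same result).

-- ===== PORT A =====
-- the for-loop over range(len(st)) with early break, as structural recursion over st's characters
def isInSetGo (arr : String) : List Char → Bool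
  | [] => true
  | c :: rest => if arr.toList.contains c then isInSetGo arr rest else false

def isInSet (st : String) (arr : String) : Bool := isInSetGo arr st.toList

-- ===== PORT B =====
-- merge_sub from Source B: two-pointer walk over two strictly increasing lists
def mergeSub : List Char → List Char → Bool
  | [], _ => true
  | _ :: _, [] => false
  | x :: xs, y :: ys =>
    if y < x then mergeSub (x :: xs) ys
    else if y == x then mergeSub xs (y :: ys)
    else false
  termination_by a b => a.length + b.length

def isInSet_alt (st : String) (arr : String) : Bool :=
  mergeSub (PySem.List.sorted (PySem.Set.ofList st.toList) (fun c => c) false)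
           (PySem.List.sorted (PySem.Set.ofList arr.toList) (fun c => c) false)

-- ===== PRECONDITION & SPEC =====
def Spec_isInSet (st : String) (arr : String) (out : Bool) : Prop := out = isInSet_alt st arr
instance (st : String) (arr : String) (out : Bool) : Decidable (Spec_isInSet st arr out) := by unfold Spec_isInSet; infer_instance

-- ===== CLAIM (what is proved, stated in full; the proofs are below) =====
def Claim_equal_isInSet : Prop := ∀ (st : String) (arr : String), Dom_isInSet st arr → Spec_isInSet st arr (isInSet st arr)

-- ===== LEMMAS AND PROOFS =====
theorem isInSetGo_iff (arr : String) (l : List Char) :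
    isInSetGo arr l = true ↔ ∀ c ∈ l, c ∈ arr.toList := by
  induction l with
  | nil => simp [isInSetGo]
  | cons c rest ih =>
    by_cases h : c ∈ arr.toList <;> simp [isInSetGo, h, ih]

theorem mergeSub_iff (a b : List Char) (ha : a.Pairwise (· < ·)) (hb : b.Pairwise (· < ·)) :
    mergeSub a b = true ↔ ∀ x ∈ a, x ∈ b := by
  induction b generalizing a with
  | nil =>
    cases a with
    | nil => simp [mergeSub]
    | cons x xs =>
      simp [mergeSub]
      exact ⟨x, fun h => absurd rfl h⟩
  | cons y ys ihb =>
    induction a with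
    | nil => simp [mergeSub]
    | cons x xs iha =>
      rcases List.pairwise_cons.mp ha with ⟨hax, ha'⟩
      rcases List.pairwise_cons.mp hb with ⟨hby, hb'⟩
      by_cases hlt : y < x
      · -- drop y: y is strictly below every element of x :: xs
        rw [mergeSub, if_pos hlt, ihb _ ha hb']
        constructor
        · intro h z hz
          exact List.mem_cons_of_mem y (h z hz)
        · intro h z hz
          have hzy : y < z := by
            rcases List.mem_cons.mp hz with rfl | hz2
            · exact hlt
            · exact lt_trans hlt (hax z hz2)
          rcases List.mem_cons.mp (h z hz) with rfl | h2
          · exact absurd hzy (lt_irrefl z)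
          · exact h2
      · by_cases heq : y = x
        · subst heq
          rw [mergeSub, if_neg hlt, if_pos (by simp), iha ha']
          constructor
          · intro h z hz
            rcases List.mem_cons.mp hz with rfl | hz2
            · exact List.mem_cons_self
            · exact h z hz2
          · intro h z hz
            exact h z (List.mem_cons_of_mem y hz)
        · have hxy : x < y := lt_of_le_of_ne (le_of_not_gt hlt) (fun h => heq h.symm)
          rw [mergeSub, if_neg hlt, if_neg (by simpa using heq)]
          simp only [Bool.false_eq_true, false_iff, not_forall]
          refine ⟨x, List.mem_cons_self, fun hx => ?_⟩
          rcases List.mem_cons.mp hx with rfl | hx2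
          · exact lt_irrefl x hxy
          · exact absurd hxy (not_lt_of_gt (hby x hx2))

theorem isInSet_alt_iff (st arr : String) :
    isInSet_alt st arr = true ↔ ∀ c ∈ st.toList, c ∈ arr.toList := by
  rw [isInSet_alt, mergeSub_iff _ _ (PySem.List.sorted_ofList_pairwise_lt _)
    (PySem.List.sorted_ofList_pairwise_lt _)]
  simp [PySem.List.mem_sorted, PySem.Set.mem_ofList]

-- ===== VERDICT (by name: the statement is the Claim_ definition above) =====
theorem isInSet_spec : Claim_equal_isInSet := by
  intro st arr _
  unfold Spec_isInSet
  rw [Bool.eq_iff_iff, isInSet, isInSetGo_iff, isInSet_alt_iff]
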